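-- pv_equiv track=rewrite | github.com/metasync/luban-ci | tools/luban-provisioner/src/luban_provisioner/commands/promote.py | _select_image
-- ===== SOURCE A (Python) =====
-- def _select_image(images, app_name):
--     if not images:
--         return None
--
--     if len(images) == 1:
--         return images[0]
--
--     suffix = f"/{app_name}"
--     for image in images:
--         name = image.get("name") or ""
--         if name.endswith(suffix):
--             return image
--
--     for image in images:
--         name = image.get("name") or ""
--         if suffix in name:
--             return image
--
--     return images[0]
-- ===== SOURCE B (Python) =====
-- def _select_image(images, app_name):
--     suffix = "/" + app_name
--     fallback = None
--     for image in images: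
--         name = image.get("name") or ""
--         if name.endswith(suffix):
--             return image
--         if fallback is None and suffix in name:
--             fallback = image
--     if fallback is not None:
--         return fallback
--     return images[0] if images else None
-- ===== Notes on version B (the rewrite author's own statement) =====
-- stated objective: simpler
-- what changed: Replaces A's two sequential scans (plus separate empty/singleton guards) with one single pass carrying a fallback accumulator for the first substring match; empty and singleton cases fall out of the final images[0]-or-None line.
import Mathlib
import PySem

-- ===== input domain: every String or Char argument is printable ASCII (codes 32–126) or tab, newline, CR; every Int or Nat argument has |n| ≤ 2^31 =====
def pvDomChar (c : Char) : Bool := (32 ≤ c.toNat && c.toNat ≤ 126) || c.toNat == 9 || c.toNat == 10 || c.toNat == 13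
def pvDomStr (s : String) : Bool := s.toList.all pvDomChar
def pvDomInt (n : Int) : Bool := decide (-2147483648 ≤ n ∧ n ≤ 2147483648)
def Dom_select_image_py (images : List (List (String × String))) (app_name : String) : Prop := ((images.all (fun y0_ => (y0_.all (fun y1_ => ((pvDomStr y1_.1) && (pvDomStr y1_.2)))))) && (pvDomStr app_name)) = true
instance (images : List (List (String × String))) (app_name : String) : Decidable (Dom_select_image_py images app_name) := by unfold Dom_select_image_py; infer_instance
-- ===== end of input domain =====

-- B replaces A's two sequential scans and its empty/singleton guards with one single pass
-- carrying a fallback accumulator (objective: simpler).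
-- ===== PORT A =====
-- first loop of A: return the first image whose name ends with suffix
def selA_endswith (images : List (List (String × String))) (suffix : String) : Option (List (String × String)) :=
  match images with
  | [] => none
  | image :: rest =>
    let name := ((PySem.Dict.mk image).get? "name").getD ""
    if PySem.Str.endswith name suffix then some image else selA_endswith rest suffix

-- second loop of A: return the first image whose name contains suffix
def selA_contains (images : List (List (String × String))) (suffix : String) : Option (List (String × String)) :=
  match images with
  | [] => none
  | image :: rest =>
    let name := ((PySem.Dict.mk image).get? "name").getD ""
    if PySem.Str.isIn suffix name then some image else selA_contains rest suffix

def select_image_py (images : List (List (String × String))) (app_name : String) : Option (List (String × String)) :=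
  if images = [] then none
  else if images.length = 1 then images.head?
  else
    let suffix := "/" ++ app_name
    match selA_endswith images suffix with
    | some image => some image
    | none =>
      match selA_contains images suffix with
      | some image => some image
      | none => images.head?

-- ===== PORT B =====
-- B's single loop: early return on an endswith match, otherwise remember the first
-- substring match in `fallback`; at the end of the list, the loop yields the fallback.
def selB_loop (images : List (List (String × String))) (suffix : String)
    (fallback : Option (List (String × String))) : Option (List (String × String)) :=
  match images with
  | [] => fallback
  | image :: rest =>
    let name := ((PySem.Dict.mk image).get? "name").getD ""
    if PySem.Str.endswith name suffix then some image
    else selB_loop rest suffix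
      (if fallback.isNone && PySem.Str.isIn suffix name then some image else fallback)

def select_image_py_alt (images : List (List (String × String))) (app_name : String) : Option (List (String × String)) :=
  match selB_loop images ("/" ++ app_name) none with
  | some image => some image
  | none => images.head?

-- ===== PRECONDITION & SPEC =====
def Spec_select_image_py (images : List (List (String × String))) (app_name : String) (out : Option (List (String × String))) : Prop := out = select_image_py_alt images app_name
instance (images : List (List (String × String))) (app_name : String) (out : Option (List (String × String))) : Decidable (Spec_select_image_py images app_name out) := by unfold Spec_select_image_py; infer_instance

-- ===== CLAIM (what is proved, stated in full; the proofs are below) =====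
def Claim_equal_select_image_py : Prop := ∀ (images : List (List (String × String))) (app_name : String), Dom_select_image_py images app_name → Spec_select_image_py images app_name (select_image_py images app_name)

-- ===== LEMMAS AND PROOFS =====

-- ===== VERDICT (by name: the statement is the Claim_ definition above) =====
-- loop invariant: the single pass equals "first endswith, else pending fallback, else first contains"
theorem selB_loop_eq (images : List (List (String × String))) (suffix : String)
    (fb : Option (List (String × String))) :
    selB_loop images suffix fb =
      (selA_endswith images suffix).or (fb.or (selA_contains images suffix)) := by
  induction images generalizing fb with
  | nil => simp [selB_loop, selA_endswith, selA_contains]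
  | cons image rest ih =>
    simp only [selB_loop, selA_endswith, selA_contains, PySem.Str.endswith_eq, PySem.Str.isIn_eq]
    by_cases h : PySem.Chars.endswith (((PySem.Dict.mk image).get? "name").getD "").toList suffix.toList = true
    · simp [h]
    · simp only [h, Bool.false_eq_true, ite_false, ih]
      cases fb with
      | none => by_cases hc : PySem.Chars.isIn suffix.toList (((PySem.Dict.mk image).get? "name").getD "").toList = true <;>
          simp [hc]
      | some x => simp

theorem select_image_py_spec : Claim_equal_select_image_py := by
  intro images app_name _
  unfold Spec_select_image_py select_image_py select_image_py_alt
  rw [selB_loop_eq]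
  match images with
  | [] => simp [selA_endswith, selA_contains]
  | [image] =>
    -- a one-element list: every branch of the combined selector yields that element
    simp only [selA_endswith, selA_contains, List.length_singleton]
    split_ifs <;> simp_all
  | image :: b :: rest =>
    simp only [List.length_cons, reduceCtorEq, if_false]
    cases he : selA_endswith (image :: b :: rest) ("/" ++ app_name) with
    | some x => simp
    | none =>
      cases hcnt : selA_contains (image :: b :: rest) ("/" ++ app_name) <;> simp
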